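-- pv_equiv track=rewrite | github.com/kabetani-yusei/AHC041 | main.py | dfs_for_score
-- ===== SOURCE A (Python) =====
-- def dfs_for_score(i, memo, result):
--     if result[i] == -1:
--         memo[i] = 1
--         return 1
--     if i in memo:
--         return memo[i]
--     memo[i] = 1 + dfs_for_score(result[i], memo, result)
--     return memo[i]
-- ===== SOURCE B (Python) =====
-- def dfs_for_score(i, memo, result):
--     # Iterative version: walk the parent chain pushing nodes on a stack,
--     # then pop them back off assigning depths. Same memo writes as the
--     # recursive original; equivalence claimed for the return value.
--     stack = []
--     cur = i
--     while True:
--         if result[cur] == -1: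
--             memo[cur] = 1
--             base = 1
--             break
--         if cur in memo:
--             base = memo[cur]
--             break
--         stack.append(cur)
--         cur = result[cur]
--     depth = base
--     while stack:
--         node = stack.pop()
--         depth += 1
--         memo[node] = depth
--     return memo[i]
-- ===== Notes on version B (the rewrite author's own statement) =====
-- stated objective: alternative
-- what changed: Replaced the memoized recursion by an explicit iterative two-phase loop: descend the parent chain collecting unresolved nodes on a stack, then pop them off assigning depths; no recursion at all.
import Mathlib
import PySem

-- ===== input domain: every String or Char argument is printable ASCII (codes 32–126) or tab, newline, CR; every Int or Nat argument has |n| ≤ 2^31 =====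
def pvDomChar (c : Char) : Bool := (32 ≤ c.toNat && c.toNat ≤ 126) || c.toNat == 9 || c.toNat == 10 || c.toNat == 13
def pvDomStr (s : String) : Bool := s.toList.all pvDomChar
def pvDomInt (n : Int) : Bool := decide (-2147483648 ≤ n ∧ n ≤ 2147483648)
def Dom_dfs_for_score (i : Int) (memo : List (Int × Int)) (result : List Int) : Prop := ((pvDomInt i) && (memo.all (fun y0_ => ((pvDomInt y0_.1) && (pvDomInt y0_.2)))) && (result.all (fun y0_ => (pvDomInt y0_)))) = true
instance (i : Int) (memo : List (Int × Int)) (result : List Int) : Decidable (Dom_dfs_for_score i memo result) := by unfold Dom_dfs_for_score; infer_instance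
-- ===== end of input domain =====

-- B replaces A's memoized recursion by an explicit two-phase stack loop (alternative
-- decomposition, same cost). A mutates `memo` in place; the equivalence proved here is
-- about the RETURN value only (B performs the same memo writes in Python).

-- ===== PORT A =====
-- literal port of A's recursion; `fuel` only makes the recursion structural (under
-- Pre_ the chain stops within 2*result.length+2 steps, so the fuel is never exhausted)
def dfsARec (result : List Int) : Nat → Int → PySem.Dict Int Int → Int × PySem.Dict Int Int
  | 0, _, memo => (0, memo)
  | fuel + 1, i, memo =>
    if PySem.List.pyGet? result i = some (-1) then
      (1, memo.insert i 1)
    else if memo.contains i then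
      (memo.getD i 0, memo)
    else
      let vm := dfsARec result fuel ((PySem.List.pyGet? result i).getD 0) memo
      (1 + vm.1, (vm.2.insert i (1 + vm.1)))

def dfs_for_score (i : Int) (memo : List (Int × Int)) (result : List Int) : Int :=
  (dfsARec result (2 * result.length + 2) i (PySem.Dict.ofList memo)).1

-- ===== PORT B =====
-- first while-loop of B: descend the chain, pushing unresolved nodes onto `stack`
def descendB (result : List Int) : Nat → Int → PySem.Dict Int Int → List Int →
    PySem.Dict Int Int × List Int × Int
  | 0, _, memo, stack => (memo, stack, 0)
  | fuel + 1, cur, memo, stack =>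
    if PySem.List.pyGet? result cur = some (-1) then
      (memo.insert cur 1, stack, 1)
    else if memo.contains cur then
      (memo, stack, memo.getD cur 0)
    else
      descendB result fuel ((PySem.List.pyGet? result cur).getD 0) memo (stack ++ [cur])

-- second while-loop of B: pop nodes, assigning increasing depths
def popStep (p : PySem.Dict Int Int × Int) (node : Int) : PySem.Dict Int Int × Int :=
  (p.1.insert node (p.2 + 1), p.2 + 1)

def dfs_for_score_alt (i : Int) (memo : List (Int × Int)) (result : List Int) : Int :=
  let m0 := PySem.Dict.ofList memo
  let dsb := descendB result (2 * result.length + 2) i m0 []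
  let md := dsb.2.1.reverse.foldl popStep (dsb.1, dsb.2.2)
  md.1.getD i 0

-- ===== PRECONDITION & SPEC =====
-- chainOk walks the input's parent-pointer structure only (no memo writes, no depths):
-- it is true iff the chain i, result[i], result[result[i]], … reaches a node whose
-- parent is -1 or a node already in memo, through valid Python indices, within the
-- given number of steps.
def chainOk (result : List Int) (m : PySem.Dict Int Int) : Nat → Int → Bool
  | 0, _ => false
  | fuel + 1, cur =>
    match PySem.List.pyGet? result cur with
    | none => false
    | some r => if r = -1 then true else if m.contains cur then true else
        chainOk result m fuel r

-- Pre_ is the function's natural domain, a condition on the input's parent-pointer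
-- structure only (chainOk never performs A's memo writes or depth computation).
-- Pre_ holds exactly on the inputs on which the Python A returns: the parent chain
-- from i reaches a root (result[cur] == -1) or a memoized node through valid indices.
-- Elsewhere A raises (IndexError on an out-of-range index, unbounded recursion on a
-- cycle not cut by memo); at most 2*len(result)+2 steps are needed, since a longer
-- walk must revisit one of the ≤ 2*len(result)+1 possible nodes and hence cycles.
def Pre_dfs_for_score (i : Int) (memo : List (Int × Int)) (result : List Int) : Prop :=
  chainOk result (PySem.Dict.ofList memo) (2 * result.length + 2) i = true
instance (i : Int) (memo : List (Int × Int)) (result : List Int) : Decidable (Pre_dfs_for_score i memo result) := by unfold Pre_dfs_for_score; infer_instance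
def pvWitness_dfs_for_score : Int × (List (Int × Int)) × List Int := (2, [(0, 3)], [-1, 0, 1])

def Spec_dfs_for_score (i : Int) (memo : List (Int × Int)) (result : List Int) (out : Int) : Prop := out = dfs_for_score_alt i memo result
instance (i : Int) (memo : List (Int × Int)) (result : List Int) (out : Int) : Decidable (Spec_dfs_for_score i memo result out) := by unfold Spec_dfs_for_score; infer_instance

-- ===== CLAIM (what is proved, stated in full; the proofs are below) =====
def Claim_equal_dfs_for_score : Prop := ∀ (i : Int) (memo : List (Int × Int)) (result : List Int), Dom_dfs_for_score i memo result → Pre_dfs_for_score i memo result → Spec_dfs_for_score i memo result (dfs_for_score i memo result)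

-- ===== LEMMAS AND PROOFS =====

lemma chainOk_step (result : List Int) (m : PySem.Dict Int Int) (f : Nat) (cur r : Int)
    (hget : PySem.List.pyGet? result cur = some r) :
    chainOk result m (f + 1) cur =
      (if r = -1 then true else if m.contains cur then true else chainOk result m f r) := by
  simp only [chainOk, hget]

lemma dfsA_step (result : List Int) (f : Nat) (cur : Int) (m : PySem.Dict Int Int)
    (r : Int) (hget : PySem.List.pyGet? result cur = some r) :
    dfsARec result (f + 1) cur m =
      if r = -1 then (1, m.insert cur 1)
      else if m.contains cur then (m.getD cur 0, m)
      else (1 + (dfsARec result f r m).1,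
            (dfsARec result f r m).2.insert cur (1 + (dfsARec result f r m).1)) := by
  simp only [dfsARec, hget, Option.getD_some, Option.some.injEq]

lemma descendB_step (result : List Int) (f : Nat) (cur : Int) (m : PySem.Dict Int Int)
    (stack : List Int) (r : Int) (hget : PySem.List.pyGet? result cur = some r) :
    descendB result (f + 1) cur m stack =
      if r = -1 then (m.insert cur 1, stack, 1)
      else if m.contains cur then (m, stack, m.getD cur 0)
      else descendB result f r m (stack ++ [cur]) := by
  simp only [descendB, hget, Option.getD_some, Option.some.injEq]

lemma pop_depth : ∀ (l : List Int) (m : PySem.Dict Int Int) (b : Int),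
    (l.foldl popStep (m, b)).2 = b + l.length := by
  intro l
  induction l with
  | nil => intro m b; simp
  | cons x xs ih =>
    intro m b
    simp only [List.foldl_cons]
    rw [ih]
    simp only [popStep, List.length_cons]
    push_cast
    ring

lemma pop_spec (p : List Int) (m : PySem.Dict Int Int) (b : Int) (i : Int)
    (hh : p.head? = some i) :
    ((p.reverse).foldl popStep (m, b)).1.getD i 0 = b + p.length := by
  obtain ⟨ps, rfl⟩ : ∃ ps, p = i :: ps := by
    cases p with
    | nil => simp at hh
    | cons x xs => simp at hh; exact ⟨xs, by rw [hh]⟩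
  rw [List.reverse_cons, List.foldl_append]
  simp only [List.foldl_cons, List.foldl_nil]
  rcases hfold : ps.reverse.foldl popStep (m, b) with ⟨M, D⟩
  have hD : D = b + ps.reverse.length := by
    have := pop_depth ps.reverse m b
    rw [hfold] at this; exact this
  simp only [popStep, PySem.Dict.getD_insert_self]
  simp only [List.length_reverse] at hD
  simp only [List.length_cons]
  push_cast
  omega

-- the two descents visit the same chain with the same (unchanged) memo; B's stack
-- length plus its base depth equals A's returned depth
lemma descend_spec (result : List Int) :
    ∀ f : Nat, ∀ (cur : Int) (m : PySem.Dict Int Int) (acc : List Int),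
      chainOk result m f cur = true →
      ∃ p b m1, descendB result f cur m acc = (m1, acc ++ p, b) ∧
        (dfsARec result f cur m).1 = b + p.length ∧
        (p = [] → m1.getD cur 0 = b) ∧
        p.head?.getD cur = cur := by
  intro f
  induction f with
  | zero => intro cur m acc h; simp [chainOk] at h
  | succ f ih =>
    intro cur m acc h
    cases hget : PySem.List.pyGet? result cur with
    | none => simp [chainOk, hget] at h
    | some r =>
      rw [chainOk_step result m f cur r hget] at h
      rw [descendB_step result f cur m acc r hget,
          dfsA_step result f cur m r hget]
      by_cases hr : r = -1
      · refine ⟨[], 1, m.insert cur 1, ?_, ?_, ?_, ?_⟩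
        · rw [if_pos hr]; simp
        · rw [if_pos hr]; simp
        · intro _; rw [PySem.Dict.getD_insert_self]
        · simp
      · rw [if_neg hr] at h ⊢
        rw [if_neg hr]
        by_cases hc : m.contains cur
        · refine ⟨[], m.getD cur 0, m, ?_, ?_, ?_, ?_⟩
          · rw [if_pos hc]; simp
          · rw [if_pos hc]; simp
          · intro _; rfl
          · simp
        · rw [if_neg hc] at h ⊢
          rw [if_neg hc]
          obtain ⟨p, b, m1, heq, hval, _, _⟩ := ih r m (acc ++ [cur]) h
          refine ⟨cur :: p, b, m1, ?_, ?_, ?_, ?_⟩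
          · rw [heq, List.append_assoc]; rfl
          · simp only [hval, List.length_cons]
            push_cast
            ring
          · intro hbad; simp at hbad
          · simp

-- ===== VERDICT (by name: the statement is the Claim_ definition above) =====
theorem dfs_for_score_spec : Claim_equal_dfs_for_score := by
  intro i memo result _ hpre
  unfold Spec_dfs_for_score dfs_for_score dfs_for_score_alt
  obtain ⟨p, b, m1, heq, hval, hemp, hhd⟩ :=
    descend_spec result (2 * result.length + 2) i (PySem.Dict.ofList memo) [] hpre
  rw [hval]
  simp only [heq, List.nil_append]
  cases p with
  | nil =>
    simp only [List.reverse_nil, List.foldl_nil, List.length_nil]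
    rw [hemp rfl]
    simp
  | cons x xs =>
    have hx : x = i := by simpa using hhd
    rw [hx]
    exact (pop_spec (i :: xs) m1 b i (by simp)).symm
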